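-- pv_equiv track=rewrite | github.com/ShawnDong98/Algorithm-Book | huawei/36. 寻找最富裕的小家庭.py | max_wealth
-- ===== SOURCE A (Python) =====
-- from collections import defaultdict
--
-- def max_wealth(N, wealthes, relations):
--     res = []
--     tree = defaultdict(list)
--     for parent, child in relations:
--         tree[parent].append(child)
--
--     for node in range(1, N+1):
--         family_wealth = wealthes[node-1]
--         for child in tree[node]:
--             family_wealth += wealthes[child-1]
--
--         res.append(family_wealth)
--
--     return max(res)
-- ===== SOURCE B (Python) =====
-- def max_wealth(N, wealthes, relations):
--     # Edge-accumulation: no adjacency dict, one pass over relations.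
--     family = list(wealthes[:N])
--     for parent, child in relations:
--         if 1 <= parent <= N:
--             family[parent - 1] += wealthes[child - 1]
--     return max(family)
-- ===== Notes on version B (the rewrite author's own statement) =====
-- stated objective: simpler
-- what changed: Drops the adjacency dict and the node-then-children double traversal: B seeds an array with each node's own wealth and scatter-adds each relation's child wealth onto its parent in a single pass over the edges.
import Mathlib
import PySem

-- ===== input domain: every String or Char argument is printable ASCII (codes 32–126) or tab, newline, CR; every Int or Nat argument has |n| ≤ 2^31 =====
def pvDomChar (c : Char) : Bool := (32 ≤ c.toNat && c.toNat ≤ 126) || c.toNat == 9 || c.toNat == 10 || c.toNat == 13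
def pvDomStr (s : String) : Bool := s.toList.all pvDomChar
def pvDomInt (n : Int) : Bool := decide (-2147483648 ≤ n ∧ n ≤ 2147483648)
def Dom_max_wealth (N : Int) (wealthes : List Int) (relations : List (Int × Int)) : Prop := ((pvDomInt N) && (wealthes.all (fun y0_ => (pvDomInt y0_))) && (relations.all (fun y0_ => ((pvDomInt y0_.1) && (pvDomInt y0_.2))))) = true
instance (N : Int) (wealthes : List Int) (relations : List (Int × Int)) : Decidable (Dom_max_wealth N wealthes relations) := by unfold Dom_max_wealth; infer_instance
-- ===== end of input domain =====

-- B drops A's adjacency dict: it scatter-adds each edge's child wealth onto the parent in one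
-- pass over the relations; return values proved equal on Pre_ (no observable mutation).

-- ===== PORT A =====
-- literal port of A: build defaultdict(list) of children, then for node in range(1, N+1)
-- sum own wealth plus children's, append to res, return max(res).
def max_wealth (N : Int) (wealthes : List Int) (relations : List (Int × Int)) : Int :=
  let tree : PySem.Dict Int (List Int) :=
    relations.foldl (fun d pc => d.modify pc.1 [] (· ++ [pc.2])) PySem.Dict.empty
  let res : List Int :=
    (PySem.List.pyRange 1 (N + 1) 1).foldl (fun acc node =>
      let fw := PySem.List.pyGetD wealthes (node - 1) 0
      let fw := (tree.getD node []).foldl (fun a c => a + PySem.List.pyGetD wealthes (c - 1) 0) fw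
      acc ++ [fw]) []
  (PySem.List.max? res (fun x => x)).getD 0

-- ===== PORT B =====
-- literal port of Source B: family = list(wealthes[:N]); for (parent, child): if 1<=parent<=N:
-- family[parent-1] += wealthes[child-1]; return max(family).
def max_wealth_alt (N : Int) (wealthes : List Int) (relations : List (Int × Int)) : Int :=
  let family : List Int :=
    relations.foldl (fun f pc =>
      if 1 ≤ pc.1 ∧ pc.1 ≤ N then
        PySem.List.pySetD f (pc.1 - 1)
          (PySem.List.pyGetD f (pc.1 - 1) 0 + PySem.List.pyGetD wealthes (pc.2 - 1) 0)
      else f)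
      (PySem.List.slice wealthes none (some N))
  (PySem.List.max? family (fun x => x)).getD 0

-- ===== PRECONDITION & SPEC =====
-- Pre_ excludes exactly the inputs where the Python A raises: N < 1 (max of an empty list,
-- ValueError), N > len(wealthes) (IndexError at some node), or an IndexError on
-- wealthes[child-1] for a relation whose parent is actually visited (1 <= parent <= N).
def Pre_max_wealth (N : Int) (wealthes : List Int) (relations : List (Int × Int)) : Prop :=
  1 ≤ N ∧ N ≤ (wealthes.length : Int) ∧
    ∀ pc ∈ relations, (1 ≤ pc.1 ∧ pc.1 ≤ N) → PySem.Raise.InRange wealthes.length (pc.2 - 1)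
instance (N : Int) (wealthes : List Int) (relations : List (Int × Int)) : Decidable (Pre_max_wealth N wealthes relations) := by unfold Pre_max_wealth; infer_instance

def pvWitness_max_wealth : Int × List Int × (List (Int × Int)) := (2, [3, 5], [(1, 2)])

def Spec_max_wealth (N : Int) (wealthes : List Int) (relations : List (Int × Int)) (out : Int) : Prop := out = max_wealth_alt N wealthes relations
instance (N : Int) (wealthes : List Int) (relations : List (Int × Int)) (out : Int) : Decidable (Spec_max_wealth N wealthes relations out) := by unfold Spec_max_wealth; infer_instance

-- ===== CLAIM (what is proved, stated in full; the proofs are below) =====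
def Claim_equal_max_wealth : Prop := ∀ (N : Int) (wealthes : List Int) (relations : List (Int × Int)), Dom_max_wealth N wealthes relations → Pre_max_wealth N wealthes relations → Spec_max_wealth N wealthes relations (max_wealth N wealthes relations)

-- ===== LEMMAS AND PROOFS =====

-- the per-node wealth both programs compute: own wealth plus the sum over matching relations
def pvRowSum (w : List Int) (rels : List (Int × Int)) (node : Int) : Int :=
  ((rels.filter (fun pc => pc.1 == node)).map (fun pc => PySem.List.pyGetD w (pc.2 - 1) 0)).sum

-- B's fold invariant: length is preserved and entry k accumulates pvRowSum for node k+1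
lemma bfold_inv (N : Int) (w : List Int) (hN : 1 ≤ N) :
    ∀ (rels : List (Int × Int)) (f : List Int), f.length = N.toNat →
      (rels.foldl (fun f pc =>
        if 1 ≤ pc.1 ∧ pc.1 ≤ N then
          PySem.List.pySetD f (pc.1 - 1)
            (PySem.List.pyGetD f (pc.1 - 1) 0 + PySem.List.pyGetD w (pc.2 - 1) 0)
        else f) f).length = N.toNat ∧
      ∀ k : Nat, k < N.toNat →
        (rels.foldl (fun f pc =>
          if 1 ≤ pc.1 ∧ pc.1 ≤ N then
            PySem.List.pySetD f (pc.1 - 1)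
              (PySem.List.pyGetD f (pc.1 - 1) 0 + PySem.List.pyGetD w (pc.2 - 1) 0)
          else f) f).getD k 0 = f.getD k 0 + pvRowSum w rels ((k : Int) + 1) := by
  intro rels
  induction rels with
  | nil =>
    intro f hf
    refine ⟨hf, ?_⟩
    intro k hk
    simp [pvRowSum]
  | cons pc rest ih =>
    intro f hf
    by_cases hg : 1 ≤ pc.1 ∧ pc.1 ≤ N
    · have hset : PySem.List.pySetD f (pc.1 - 1)
          (PySem.List.pyGetD f (pc.1 - 1) 0 + PySem.List.pyGetD w (pc.2 - 1) 0)
          = f.set (pc.1 - 1).toNat (PySem.List.pyGetD f (pc.1 - 1) 0 + PySem.List.pyGetD w (pc.2 - 1) 0) :=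
        PySem.List.pySetD_of_nonneg _ _ (by omega)
      have hlen : (f.set (pc.1 - 1).toNat (PySem.List.pyGetD f (pc.1 - 1) 0 + PySem.List.pyGetD w (pc.2 - 1) 0)).length = N.toNat := by
        simp [hf]
      obtain ⟨hl, hk⟩ := ih _ hlen
      refine ⟨by simpa [List.foldl_cons, hg, hset] using hl, ?_⟩
      intro k hklt
      have := hk k hklt
      simp only [List.foldl_cons, if_pos hg, hset] at *
      rw [this]
      by_cases heq : pc.1 = (k : Int) + 1
      · have hidx : (pc.1 - 1).toNat = k := by omega
        have hkf : k < f.length := by omega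
        have hgetset : (f.set (pc.1 - 1).toNat (PySem.List.pyGetD f (pc.1 - 1) 0 + PySem.List.pyGetD w (pc.2 - 1) 0)).getD k 0
            = PySem.List.pyGetD f (pc.1 - 1) 0 + PySem.List.pyGetD w (pc.2 - 1) 0 := by
          rw [List.getD_eq_getElem?_getD, hidx, List.getElem?_set_self (by omega)]
          rfl
        have hpg : PySem.List.pyGetD f (pc.1 - 1) 0 = f.getD k 0 := by
          rw [PySem.List.pyGetD_eq_getElem f 0 (by omega) (by rw [hf]; omega),
            List.getD_eq_getElem?_getD, List.getElem?_eq_getElem hkf]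
          simp [hidx]
        rw [hgetset, hpg, pvRowSum, pvRowSum]
        have : (pc.1 == (k : Int) + 1) = true := by simpa using heq
        simp [this]
        ring
      · have hidx : (pc.1 - 1).toNat ≠ k := by omega
        have hgetset : (f.set (pc.1 - 1).toNat (PySem.List.pyGetD f (pc.1 - 1) 0 + PySem.List.pyGetD w (pc.2 - 1) 0)).getD k 0
            = f.getD k 0 := by
          rw [List.getD_eq_getElem?_getD, List.getD_eq_getElem?_getD,
            List.getElem?_set_ne hidx]
        rw [hgetset, pvRowSum, pvRowSum]
        have : (pc.1 == (k : Int) + 1) = false := by simpa using heq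
        simp [this]
    · obtain ⟨hl, hk⟩ := ih f hf
      refine ⟨by simpa [List.foldl_cons, hg] using hl, ?_⟩
      intro k hklt
      have hne : pc.1 ≠ (k : Int) + 1 := by
        intro h; apply hg; constructor <;> omega
      have : (pc.1 == (k : Int) + 1) = false := by simpa using hne
      simp only [List.foldl_cons, if_neg hg]
      rw [hk k hklt, pvRowSum, pvRowSum]
      simp [this]

-- ===== VERDICT (by name: the statement is the Claim_ definition above) =====
theorem max_wealth_spec : Claim_equal_max_wealth := by
  intro N w rels _ hpre
  obtain ⟨hN, hNlen, _⟩ := hpre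
  unfold Spec_max_wealth max_wealth max_wealth_alt
  dsimp only
  -- reduce both sides to max? over the same list
  have hA : (PySem.List.pyRange 1 (N + 1) 1).foldl (fun acc node =>
      acc ++ [((rels.foldl (fun d pc => d.modify pc.1 [] (· ++ [pc.2])) PySem.Dict.empty).getD node []).foldl
        (fun a c => a + PySem.List.pyGetD w (c - 1) 0) (PySem.List.pyGetD w (node - 1) 0)]) []
      = (PySem.List.pyRange 1 (N + 1) 1).map (fun node =>
          PySem.List.pyGetD w (node - 1) 0 + pvRowSum w rels node) := by
    rw [PySem.List.foldl_append_singleton_eq_map]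
    simp only [List.nil_append]
    apply List.map_congr_left
    intro node _
    rw [PySem.Dict.getD_foldl_modify_append, PySem.Dict.getD_empty, List.nil_append,
      PySem.List.foldl_add]
    rw [pvRowSum, List.map_map]
    rfl
  have hfam := bfold_inv N w hN rels (PySem.List.slice w none (some N))
    (by rw [PySem.List.slice_to w (by omega)]; simp [List.length_take]; omega)
  obtain ⟨hlenB, hptB⟩ := hfam
  set famB := rels.foldl (fun f pc =>
      if 1 ≤ pc.1 ∧ pc.1 ≤ N then
        PySem.List.pySetD f (pc.1 - 1)
          (PySem.List.pyGetD f (pc.1 - 1) 0 + PySem.List.pyGetD w (pc.2 - 1) 0)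
      else f) (PySem.List.slice w none (some N)) with hfamdef
  have hlists : (PySem.List.pyRange 1 (N + 1) 1).map (fun node =>
      PySem.List.pyGetD w (node - 1) 0 + pvRowSum w rels node) = famB := by
    apply List.ext_getElem
    · rw [List.length_map, PySem.List.length_pyRange_one, hlenB]; omega
    · intro k hk1 hk2
      have hkN : k < N.toNat := by
        simpa [PySem.List.length_pyRange_one, Int.toNat_of_nonneg (by omega : (0:Int) ≤ N + 1 - 1)] using hk1
      have hrange : (PySem.List.pyRange 1 (N + 1) 1)[k]'(by simpa [PySem.List.length_pyRange_one] using hk1) = 1 + (k : Int) :=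
        PySem.List.getElem_pyRange_one _ _ _ _
      rw [List.getElem_map]
      rw [hrange]
      have hB := hptB k hkN
      have hBk : famB[k] = famB.getD k 0 := by
        rw [List.getD_eq_getElem?_getD, List.getElem?_eq_getElem (by omega)]
        rfl
      rw [hBk, hB]
      have hslice : PySem.List.slice w none (some N) = w.take N.toNat :=
        PySem.List.slice_to w (by omega)
      have hinit : (PySem.List.slice w none (some N)).getD k 0 = PySem.List.pyGetD w (1 + (k : Int) - 1) 0 := by
        rw [hslice]
        have h1 : 1 + (k : Int) - 1 = (k : Int) := by ring
        rw [h1, PySem.List.pyGetD_natCast]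
        rw [List.getD_eq_getElem?_getD, List.getD_eq_getElem?_getD,
          List.getElem?_take_of_lt hkN]
      rw [hinit]
      congr 1
      have h1 : 1 + (k : Int) = (k : Int) + 1 := by ring
      rw [h1]
  rw [hA, hlists]
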